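-- pv_equiv track=rewrite | github.com/cirosantilli/project-euler-solvers | solvers/273.py | process_prime
-- ===== SOURCE A (Python) =====
-- def process_prime(prime):
--     b = 1
--     while b * b < prime:
--         a = 1
--         while a < b:
--             if a * a + b * b == prime:
--                 return (a, b)
--             a += 1
--         b += 1
--     return (0, 0)
-- ===== SOURCE B (Python) =====
-- import math
--
-- def process_prime(prime):
--     b = 1
--     while b * b < prime:
--         r = prime - b * b
--         a = math.isqrt(r)
--         if a * a == r and 1 <= a < b:
--             return (a, b)
--         b += 1
--     return (0, 0)
-- ===== Notes on version B (the rewrite author's own statement) =====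
-- stated objective: faster
-- what changed: The inner linear scan over a is replaced by an isqrt perfect-square test of prime - b*b, so only b is iterated.
import Mathlib
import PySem

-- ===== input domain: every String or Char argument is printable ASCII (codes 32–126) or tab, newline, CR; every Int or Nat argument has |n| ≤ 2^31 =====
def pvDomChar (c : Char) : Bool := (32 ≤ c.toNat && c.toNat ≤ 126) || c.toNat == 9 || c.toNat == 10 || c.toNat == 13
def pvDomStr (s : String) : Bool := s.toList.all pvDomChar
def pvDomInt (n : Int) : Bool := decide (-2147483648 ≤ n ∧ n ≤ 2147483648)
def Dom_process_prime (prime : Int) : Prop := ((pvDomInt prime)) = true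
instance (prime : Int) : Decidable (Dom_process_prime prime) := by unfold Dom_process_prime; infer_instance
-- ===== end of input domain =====

-- B replaces A's inner linear scan over a by a single isqrt perfect-square test of prime - b*b (objective: faster).


-- ===== PORT A =====
-- inner 'while a < b' loop of A; the Nat argument is fuel (≥ remaining iterations), a totality guard only
def pvInnerA (prime a b : Int) : Nat → Option (Int × Int)
  | 0 => none
  | fuel + 1 =>
    if a < b then
      if a * a + b * b = prime then some (a, b)
      else pvInnerA prime (a + 1) b fuel
    else none

-- outer 'while b * b < prime' loop of A; the Nat argument is fuel, a totality guard only
def pvOuterA (prime b : Int) : Nat → List Int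
  | 0 => [0, 0]
  | fuel + 1 =>
    if b * b < prime then
      match pvInnerA prime 1 b b.toNat with
      | some (a, b') => [a, b']
      | none => pvOuterA prime (b + 1) fuel
    else [0, 0]

def process_prime (prime : Int) : List Int := pvOuterA prime 1 prime.toNat

-- ===== PORT B =====
-- single loop: test whether prime - b*b is a perfect square a*a with 1 ≤ a < b
-- (math.isqrt = Int.sqrt on nonnegatives; Source B's locals r and a are inlined); Nat fuel as above
def pvOuterB (prime b : Int) : Nat → List Int
  | 0 => [0, 0]
  | fuel + 1 =>
    if b * b < prime then
      if Int.sqrt (prime - b * b) * Int.sqrt (prime - b * b) = prime - b * b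
          ∧ 1 ≤ Int.sqrt (prime - b * b) ∧ Int.sqrt (prime - b * b) < b
      then [Int.sqrt (prime - b * b), b]
      else pvOuterB prime (b + 1) fuel
    else [0, 0]

def process_prime_alt (prime : Int) : List Int := pvOuterB prime 1 prime.toNat

-- ===== PRECONDITION & SPEC =====
def Spec_process_prime (prime : Int) (out : List Int) : Prop := out = process_prime_alt prime
instance (prime : Int) (out : List Int) : Decidable (Spec_process_prime prime out) := by unfold Spec_process_prime; infer_instance

-- ===== CLAIM (what is proved, stated in full; the proofs are below) =====
def Claim_equal_process_prime : Prop := ∀ (prime : Int), Dom_process_prime prime → Spec_process_prime prime (process_prime prime)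

-- ===== LEMMAS AND PROOFS =====

-- A's inner scan finds exactly the (unique, nonnegative) square root of prime - b*b when it lies in [a0, b).
theorem pvInnerA_eq (prime b : Int) (fuel : Nat) :
    ∀ a0 : Int, 0 ≤ a0 → (b - a0).toNat ≤ fuel →
    pvInnerA prime a0 b fuel =
      (if Int.sqrt (prime - b * b) * Int.sqrt (prime - b * b) = prime - b * b
          ∧ a0 ≤ Int.sqrt (prime - b * b) ∧ Int.sqrt (prime - b * b) < b
       then some (Int.sqrt (prime - b * b), b) else none) := by
  induction fuel with
  | zero =>
    intro a0 h0 hf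
    have hab : ¬ a0 < b := by omega
    rw [pvInnerA, if_neg]
    have hsnn : 0 ≤ Int.sqrt (prime - b * b) := Int.sqrt_nonneg _
    rintro ⟨h1, h2, h3⟩; omega
  | succ fuel ih =>
    intro a0 h0 hf
    have hsnn : 0 ≤ Int.sqrt (prime - b * b) := Int.sqrt_nonneg _
    rw [pvInnerA]
    by_cases hab : a0 < b
    · rw [if_pos hab]
      by_cases heq : a0 * a0 + b * b = prime
      · rw [if_pos heq]
        have hr : a0 * a0 = prime - b * b := by omega
        have hsa : Int.sqrt (prime - b * b) = a0 := by rw [← hr, Int.sqrt_eq]; omega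
        rw [hsa, if_pos ⟨hr, le_refl a0, hab⟩]
      · rw [if_neg heq, ih (a0 + 1) (by omega) (by omega)]
        have hiff : (Int.sqrt (prime - b * b) * Int.sqrt (prime - b * b) = prime - b * b
              ∧ a0 + 1 ≤ Int.sqrt (prime - b * b) ∧ Int.sqrt (prime - b * b) < b)
            ↔ (Int.sqrt (prime - b * b) * Int.sqrt (prime - b * b) = prime - b * b
              ∧ a0 ≤ Int.sqrt (prime - b * b) ∧ Int.sqrt (prime - b * b) < b) := by
          constructor
          · rintro ⟨h1, h2, h3⟩; exact ⟨h1, by omega, h3⟩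
          · rintro ⟨h1, h2, h3⟩
            refine ⟨h1, ?_, h3⟩
            have hne : Int.sqrt (prime - b * b) ≠ a0 := by
              intro h; apply heq; rw [h] at h1; omega
            omega
        rw [if_congr hiff rfl rfl]
    · rw [if_neg hab, if_neg]
      rintro ⟨h1, h2, h3⟩; omega

-- the two outer loops agree step by step (same fuel, same b)
theorem pvOuter_eq (prime : Int) (fuel : Nat) :
    ∀ b : Int, 0 < b → pvOuterA prime b fuel = pvOuterB prime b fuel := by
  induction fuel with
  | zero => intro b _; rw [pvOuterA, pvOuterB]
  | succ fuel ih =>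
    intro b hb
    rw [pvOuterA, pvOuterB]
    by_cases h : b * b < prime
    · rw [if_pos h, if_pos h, pvInnerA_eq prime b b.toNat 1 (by omega) (by omega)]
      by_cases hc : Int.sqrt (prime - b * b) * Int.sqrt (prime - b * b) = prime - b * b
          ∧ 1 ≤ Int.sqrt (prime - b * b) ∧ Int.sqrt (prime - b * b) < b
      · rw [if_pos hc, if_pos hc]
      · rw [if_neg hc, if_neg hc]
        exact ih (b + 1) (by omega)
    · rw [if_neg h, if_neg h]

-- ===== VERDICT (by name: the statement is the Claim_ definition above) =====
theorem process_prime_spec : Claim_equal_process_prime := by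
  intro prime _
  unfold Spec_process_prime process_prime process_prime_alt
  exact pvOuter_eq prime prime.toNat 1 (by omega)
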